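-- pv_equiv track=rewrite | github.com/tkdgns8234/DataStructure-Algorithm | Algorithm/프로그래머스/2019_카카오_개발자_겨울_인턴십/lv3_징검다리건너기.py | solution
-- ===== SOURCE A (Python) =====
-- def solution(stones, k):
--     answer = 0
--     start = 1
--     end = max(stones)
--
--     while start <= end:
--         mid = (start + end) // 2
--
--         zero_point = 0
--         flag = True
--
--         for stone in stones:
--             if stone - mid < 0: # stone - mid <= 0 인줄 알았는데 아니다 0인경우는 건널 수 있음 직접 시뮬레이션 해보자
--                 zero_point += 1
--             else:
--                 zero_point = 0
--             if zero_point == k: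
--                 flag = False
--                 break
--
--         if flag:
--             answer = mid
--             start = mid + 1
--         else:
--             end = mid - 1
--
--     return answer
-- ===== SOURCE B (Python) =====
-- def solution(stones, k):
--     n = len(stones)
--     m = max(stones)
--     if k > n:
--         # fewer stones than the jump length: every level is crossable
--         return max(m, 0)
--     best = m
--     dq = []  # indices of the current window, stone values strictly decreasing
--     for i in range(n):
--         while dq and stones[dq[-1]] <= stones[i]:
--             dq.pop()
--         dq.append(i)
--         if dq[0] <= i - k:
--             dq.pop(0)
--         if i >= k - 1:  # window [i-k+1, i] complete: its max is stones[dq[0]]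
--             best = min(best, stones[dq[0]])
--     return max(best, 0)
-- ===== Notes on version B (the rewrite author's own statement) =====
-- stated objective: alternative
-- what changed: A binary-searches the answer over [1, max(stones)], re-scanning all stones with a consecutive-low counter for each candidate; B computes the answer directly as the minimum over all length-k windows of the window maximum (clamped below by 0), maintaining the window maximum with a monotonic deque. Pre_ excludes the empty stones list (both programs raise on max([])) and k <= 0, outside the problem's natural domain (k is a positive jump length), where B's deque empties and indexing it naturally raises while A returns a value.
-- outside the precondition, e.g. on solution([3], 0): A returns 0, B raises IndexError; on solution([3, 2], -1): A returns 3, B raises IndexError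
import Mathlib
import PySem

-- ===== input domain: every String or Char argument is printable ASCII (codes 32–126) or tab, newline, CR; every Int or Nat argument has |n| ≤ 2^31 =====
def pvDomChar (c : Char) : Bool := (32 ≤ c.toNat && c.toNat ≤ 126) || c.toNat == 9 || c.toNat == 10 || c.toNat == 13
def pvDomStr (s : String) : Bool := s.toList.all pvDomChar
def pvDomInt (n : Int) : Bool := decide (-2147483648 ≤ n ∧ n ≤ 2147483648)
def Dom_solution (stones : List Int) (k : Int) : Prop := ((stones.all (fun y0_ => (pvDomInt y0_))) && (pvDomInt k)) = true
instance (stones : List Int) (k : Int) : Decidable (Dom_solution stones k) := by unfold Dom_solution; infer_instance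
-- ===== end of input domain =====

-- B replaces A's binary search (re-scanning with a consecutive-low counter per candidate) by a direct
-- min-over-windows-of-window-max computation; equivalence of the return values is proved on Pre_.

-- ===== PORT A =====
-- the inner 'for stone in stones' loop of A, with its early 'break': returns the final flag
def checkLoop (k mid : Int) : List Int → Int → Bool
  | [], _ => true
  | stone :: rest, zp =>
    let zp' := if stone - mid < 0 then zp + 1 else 0
    if zp' = k then false else checkLoop k mid rest zp'

-- the 'while start <= end' binary search, carrying (answer, start, end)
def bsGo (stones : List Int) (k answer start stop : Int) : Int :=
  if h : start ≤ stop then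
    let mid := PySem.Int.floordiv (start + stop) 2
    if checkLoop k mid stones 0 then bsGo stones k mid (mid + 1) stop
    else bsGo stones k answer start (mid - 1)
  else answer
termination_by (stop + 1 - start).toNat
decreasing_by
  all_goals
    have hb := PySem.Int.floordiv_two_mid_bounds h
    omega

def solution (stones : List Int) (k : Int) : Int :=
  -- max(stones) raises on []; that input is outside Pre_solution
  bsGo stones k 0 1 ((PySem.List.max? stones (fun x => x)).getD 0)

-- ===== PORT B =====
-- Python's dq (a list used as a deque of indices) is kept here in REVERSED order: dq.append(i) and
-- dq.pop() at the right end become cons and tail at the head; dq[0] / dq.pop(0) become getLast? / dropLast.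
-- 'while dq and stones[dq[-1]] <= stones[i]: dq.pop()'
def popLe (stones : List Int) (x : Int) : List Int → List Int
  | [] => []
  | j :: rest => if PySem.List.pyGetD stones j 0 ≤ x then popLe stones x rest else j :: rest

-- one iteration of B's 'for i in range(n)' loop; state = (reversed dq, best)
def bStep (stones : List Int) (k : Int) (s : List Int × Int) (i : Int) : List Int × Int :=
  let rdq := i :: popLe stones (PySem.List.pyGetD stones i 0) s.1
  let rdq2 := if (rdq.getLast?).getD 0 ≤ i - k then rdq.dropLast else rdq
  let best := if i ≥ k - 1 then
      min s.2 (PySem.List.pyGetD stones ((rdq2.getLast?).getD 0) 0)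
    else s.2
  (rdq2, best)

def solution_alt (stones : List Int) (k : Int) : Int :=
  let n : Int := stones.length
  -- max(stones) raises on []; that input is outside Pre_solution
  let m := (PySem.List.max? stones (fun x => x)).getD 0
  if k > n then max m 0
  else max ((PySem.List.pyRange 0 n 1).foldl (bStep stones k) ([], m)).2 0

-- ===== PRECONDITION & SPEC =====
-- Pre_ excludes the empty stones list (both programs raise on max([])) and k ≤ 0, outside the
-- problem's natural domain (k is a positive jump length), where B's deque empties and indexing it
-- naturally raises while A returns a value.
def Pre_solution (stones : List Int) (k : Int) : Prop := stones ≠ [] ∧ 1 ≤ k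
instance (stones : List Int) (k : Int) : Decidable (Pre_solution stones k) := by
  unfold Pre_solution; infer_instance
def pvWitness_solution : List Int × Int := ([2, 4, 5, 3, 2, 1, 4, 2, 5, 1], 3)

def Spec_solution (stones : List Int) (k : Int) (out : Int) : Prop := out = solution_alt stones k
instance (stones : List Int) (k : Int) (out : Int) : Decidable (Spec_solution stones k out) := by
  unfold Spec_solution; infer_instance

-- ===== CLAIM (what is proved, stated in full; the proofs are below) =====
def Claim_equal_solution : Prop := ∀ (stones : List Int) (k : Int), Dom_solution stones k → Pre_solution stones k → Spec_solution stones k (solution stones k)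

-- ===== LEMMAS AND PROOFS =====

-- max(stones[i:i+k]) of the naive window: proof-side description of what the deque head attains
def winMax (stones : List Int) (i k : Int) : Int :=
  (PySem.List.max? (PySem.List.slice stones (some i) (some (i + k))) (fun x => x)).getD 0

-- stones[j] for a Nat index (total; every index used in the proofs is in range)
def vD (stones : List Int) (j : Nat) : Int := stones.getD j 0

-- ascending list of indices j ≤ c-1 that strictly dominate everything after them (Python dq, unreversed,
-- before the window filter), defined by the loop's own recurrence
def GSeq (stones : List Int) : Nat → List Nat
  | 0 => []
  | c + 1 => (GSeq stones c).filter (fun j => decide (vD stones c < vD stones j)) ++ [c]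

-- the deque contents after processing i = 0 .. c-1: GSeq filtered to the current window
def WSeq (stones : List Int) (kn : Nat) : Nat → List Nat
  | 0 => []
  | c + 1 => (GSeq stones (c + 1)).filter (fun j => decide (c < j + kn))

-- the running minimum of window maxima after processing i = 0 .. c-1
def bestS (stones : List Int) (k m : Int) (c : Nat) : Int :=
  (PySem.List.pyRange 0 ((c : Int) - k + 1) 1).foldl (fun b i => min b (winMax stones i k)) m


-- length of the maximal prefix of l whose elements are all < mid
def leadLow (mid : Int) : List Int → Nat
  | [] => 0
  | s :: r => if s < mid then leadLow mid r + 1 else 0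

-- 'some k consecutive stones of l are all < mid'
def HasRun (l : List Int) (mid : Int) (kn : Nat) : Prop :=
  ∃ i : Nat, i + kn ≤ l.length ∧ ∀ x ∈ (l.drop i).take kn, x < mid

lemma take_allLt_iff (mid : Int) (l : List Int) (kn : Nat) :
    (kn ≤ l.length ∧ ∀ x ∈ l.take kn, x < mid) ↔ kn ≤ leadLow mid l := by
  induction l generalizing kn with
  | nil => cases kn <;> simp [leadLow]
  | cons s r ih =>
    cases kn with
    | zero => simp
    | succ j =>
      simp only [leadLow, List.take_succ_cons, List.mem_cons, List.length_cons]
      constructor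
      · rintro ⟨hlen, hall⟩
        have hs : s < mid := hall s (Or.inl rfl)
        rw [if_pos hs]
        have : j ≤ leadLow mid r := (ih j).1 ⟨by omega, fun x hx => hall x (Or.inr hx)⟩
        omega
      · intro h
        split at h
        · next hs =>
          have hj : j ≤ leadLow mid r := by omega
          obtain ⟨hlen, hall⟩ := (ih j).2 hj
          exact ⟨by omega, fun x hx => by rcases hx with rfl | hx; exact hs; exact hall x hx⟩
        · omega

lemma hasRun_of_leadLow {mid : Int} {l : List Int} {kn : Nat} (h : kn ≤ leadLow mid l) :
    HasRun l mid kn := by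
  obtain ⟨hlen, hall⟩ := (take_allLt_iff mid l kn).2 h
  exact ⟨0, by simpa using hlen, by simpa using hall⟩

lemma hasRun_cons {s : Int} {r : List Int} {mid : Int} {kn : Nat} :
    HasRun (s :: r) mid kn ↔ kn ≤ leadLow mid (s :: r) ∨ HasRun r mid kn := by
  constructor
  · rintro ⟨i, hlen, hall⟩
    cases i with
    | zero =>
      left
      exact (take_allLt_iff mid (s :: r) kn).1 ⟨by simpa using hlen, by simpa using hall⟩
    | succ i =>
      right
      exact ⟨i, by simp at hlen ⊢; omega, by simpa using hall⟩
  · rintro (h | ⟨i, hlen, hall⟩)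
    · exact hasRun_of_leadLow h
    · exact ⟨i + 1, by simp; omega, by simpa using hall⟩

lemma checkLoop_false_iff {k mid : Int} (hk : 1 ≤ k) :
    ∀ (l : List Int) (zp : Int), 0 ≤ zp → zp < k →
      (checkLoop k mid l zp = false ↔ HasRun l mid k.toNat ∨ k ≤ zp + (leadLow mid l : Int)) := by
  intro l
  induction l with
  | nil =>
    intro zp h0 hzk
    simp only [checkLoop, leadLow]
    constructor
    · intro h; cases h
    · rintro (⟨i, hlen, _⟩ | h)
      · simp at hlen; omega
      · exfalso; omega
  | cons s r ih =>
    intro zp h0 hzk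
    simp only [checkLoop]
    by_cases hs : s - mid < 0
    · have hs' : s < mid := by omega
      rw [if_pos hs]
      by_cases hk' : zp + 1 = k
      · rw [if_pos hk']
        simp only [leadLow, if_pos hs']
        constructor
        · intro _; right; push_cast; omega
        · intro _; trivial
      · rw [if_neg hk']
        rw [ih (zp + 1) (by omega) (by omega)]
        rw [hasRun_cons]
        simp only [leadLow, if_pos hs']
        have hcast : ((leadLow mid r + 1 : Nat) : Int) = (leadLow mid r : Int) + 1 := by push_cast; ring
        constructor
        · rintro (h | h)
          · exact Or.inl (Or.inr h)
          · right; omega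
        · rintro ((h | h) | h)
          · right
            have : (k.toNat : Int) ≤ (leadLow mid r : Int) + 1 := by
              rw [← hcast]; exact_mod_cast h
            omega
          · exact Or.inl h
          · right; omega
    · have hs' : ¬ s < mid := by omega
      rw [if_neg hs]
      by_cases hk0 : (0 : Int) = k
      · omega
      · rw [if_neg hk0]
        rw [ih 0 (by omega) (by omega)]
        rw [hasRun_cons]
        simp only [leadLow, if_neg hs']
        constructor
        · rintro (h | h)
          · exact Or.inl (Or.inr h)
          · left; right
            apply hasRun_of_leadLow
            have : (k.toNat : Int) ≤ (leadLow mid r : Int) := by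
              have : (k.toNat : Int) = k := Int.toNat_of_nonneg (by omega)
              omega
            exact_mod_cast this
        · rintro ((h | h) | h)
          · exfalso
            have hkn : 1 ≤ k.toNat := by omega
            simp at h; omega
          · exact Or.inl h
          · exfalso; simp at h; omega

lemma checkLoop_true_iff {k mid : Int} (hk : 1 ≤ k) (l : List Int) :
    (checkLoop k mid l 0 = true ↔ ¬ HasRun l mid k.toNat) := by
  have h := checkLoop_false_iff (mid := mid) hk l 0 (by omega) (by omega)
  constructor
  · intro htrue hrun
    have : checkLoop k mid l 0 = false := h.2 (Or.inl hrun)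
    simp [htrue] at this
  · intro hnrun
    by_contra hne
    have hfalse : checkLoop k mid l 0 = false := by
      cases hcl : checkLoop k mid l 0
      · rfl
      · exact absurd hcl hne
    rcases h.1 hfalse with hrun | hlead
    · exact hnrun hrun
    · apply hnrun
      apply hasRun_of_leadLow
      have hc : (k.toNat : Int) = k := Int.toNat_of_nonneg (by omega)
      have : (k.toNat : Int) ≤ (leadLow mid l : Int) := by omega
      exact_mod_cast this

lemma bsGo_eq_of_iff (stones : List Int) (k W : Int)
    (hP : ∀ mid, checkLoop k mid stones 0 = true ↔ mid ≤ W) :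
    ∀ (answer start stop : Int), bsGo stones k answer start stop =
      if start ≤ stop then (if W < start then answer else min W stop) else answer := by
  intro answer start stop
  fun_induction bsGo stones k answer start stop with
  | case1 answer start stop h mid hcl ih =>
    have hb := PySem.Int.floordiv_two_mid_bounds h
    have hmW : mid ≤ W := (hP mid).1 hcl
    rw [ih]
    split_ifs <;> omega
  | case2 answer start stop h mid hcl ih =>
    have hb := PySem.Int.floordiv_two_mid_bounds h
    have hmW : W < mid := by
      by_contra hc
      have := (hP mid).2 (by omega)
      simp [this] at hcl
    rw [ih]
    split_ifs <;> omega
  | case3 answer start stop h =>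
    rw [if_neg h]

lemma bsGo_all_true (stones : List Int) (k : Int)
    (hall : ∀ mid, checkLoop k mid stones 0 = true) :
    ∀ (answer start stop : Int), bsGo stones k answer start stop =
      if start ≤ stop then stop else answer := by
  intro answer start stop
  fun_induction bsGo stones k answer start stop with
  | case1 answer start stop h mid hcl ih =>
    have hb := PySem.Int.floordiv_two_mid_bounds h
    rw [ih]
    split_ifs <;> omega
  | case2 answer start stop h mid hcl ih =>
    exact absurd (hall mid) (by simp [hcl])
  | case3 answer start stop h =>
    rw [if_neg h]

lemma foldl_min_le (f : Int → Int) (l : List Int) (a : Int) :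
    l.foldl (fun b i => min b (f i)) a ≤ a := by
  induction l generalizing a with
  | nil => simp
  | cons x r ih =>
    calc r.foldl (fun b i => min b (f i)) (min a (f x)) ≤ min a (f x) := ih _
      _ ≤ a := min_le_left _ _

lemma foldl_min_lt_iff (f : Int → Int) (l : List Int) (a c : Int) :
    l.foldl (fun b i => min b (f i)) a < c ↔ a < c ∨ ∃ i ∈ l, f i < c := by
  induction l generalizing a with
  | nil => simp
  | cons x r ih =>
    rw [List.foldl_cons, ih]
    simp only [min_lt_iff, List.mem_cons]
    constructor
    · rintro ((h | h) | ⟨i, hi, hlt⟩)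
      · exact Or.inl h
      · exact Or.inr ⟨x, Or.inl rfl, h⟩
      · exact Or.inr ⟨i, Or.inr hi, hlt⟩
    · rintro (h | ⟨i, rfl | hi, hlt⟩)
      · exact Or.inl (Or.inl h)
      · exact Or.inl (Or.inr hlt)
      · exact Or.inr ⟨i, hi, hlt⟩

lemma winMax_spec (stones : List Int) (k i : Int) (hk : 1 ≤ k) (h0 : 0 ≤ i)
    (hub : i.toNat + k.toNat ≤ stones.length) :
    winMax stones i k ∈ (stones.drop i.toNat).take k.toNat ∧
      ∀ y ∈ (stones.drop i.toNat).take k.toNat, y ≤ winMax stones i k := by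
  have hslice : PySem.List.slice stones (some i) (some (i + k)) =
      (stones.drop i.toNat).take ((i + k).toNat - i.toNat) :=
    PySem.List.slice_toNat stones h0 (by omega)
  have htn : (i + k).toNat - i.toNat = k.toNat := by omega
  rw [htn] at hslice
  have hne : (stones.drop i.toNat).take k.toNat ≠ [] := by
    have : ((stones.drop i.toNat).take k.toNat).length = min k.toNat (stones.length - i.toNat) := by
      simp
    intro hnil
    rw [hnil] at this
    simp at this
    omega
  obtain ⟨M, hM⟩ : ∃ M, PySem.List.max? (PySem.List.slice stones (some i) (some (i + k))) (fun x => x) = some M := by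
    cases hc : PySem.List.max? (PySem.List.slice stones (some i) (some (i + k))) (fun x => x)
    · rw [PySem.List.max?_eq_none_iff] at hc
      rw [hslice] at hc
      exact absurd hc hne
    · exact ⟨_, rfl⟩
  have hw : winMax stones i k = M := by simp [winMax, hM]
  rw [hw]
  constructor
  · have := PySem.List.max?_mem hM
    rwa [hslice] at this
  · intro y hy
    have := PySem.List.max?_isMax hM
    rw [hslice] at this
    exact this y hy

lemma hasRun_iff_exists_win (stones : List Int) (k : Int) (hk : 1 ≤ k)
    (hkn : k ≤ (stones.length : Int)) (mid : Int) :
    HasRun stones mid k.toNat ↔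
      ∃ i ∈ PySem.List.pyRange 0 ((stones.length : Int) - k + 1) 1, winMax stones i k < mid := by
  constructor
  · rintro ⟨j, hj, hall⟩
    refine ⟨(j : Int), ?_, ?_⟩
    · rw [PySem.List.mem_pyRange_one]
      constructor
      · exact_mod_cast Int.natCast_nonneg j
      · omega
    · obtain ⟨hmem, -⟩ := winMax_spec stones k (j : Int) hk (by positivity) (by omega)
      have hjn : ((j : Int)).toNat = j := by omega
      rw [hjn] at hmem
      exact hall _ hmem
  · rintro ⟨i, hmem, hlt⟩
    rw [PySem.List.mem_pyRange_one] at hmem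
    obtain ⟨h0, hub⟩ := hmem
    refine ⟨i.toNat, by omega, ?_⟩
    intro x hx
    obtain ⟨-, hmax⟩ := winMax_spec stones k i hk h0 (by omega)
    exact lt_of_le_of_lt (hmax x hx) hlt

lemma mem_window_mem (stones : List Int) (j kn : Nat) {x : Int}
    (hx : x ∈ (stones.drop j).take kn) : x ∈ stones :=
  List.mem_of_mem_drop (List.mem_of_mem_take hx)


-- ---- deque machinery: B's fold state is (reversed WSeq, bestS) ----

lemma popLe_eq_dropWhile (stones : List Int) (x : Int) (l : List Int) :
    popLe stones x l = l.dropWhile (fun j => decide (PySem.List.pyGetD stones j 0 ≤ x)) := by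
  induction l with
  | nil => rfl
  | cons j rest ih =>
    simp only [popLe, List.dropWhile_cons]
    by_cases h : PySem.List.pyGetD stones j 0 ≤ x
    · simp [h, ih]
    · simp [h]

lemma dropWhile_eq_filter_of_incr (f : Int → Int) (x : Int) (l : List Int)
    (h : l.Pairwise (fun a b => f a < f b)) :
    l.dropWhile (fun j => decide (f j ≤ x)) = l.filter (fun j => decide (x < f j)) := by
  induction l with
  | nil => rfl
  | cons a t ih =>
    rw [List.pairwise_cons] at h
    rw [List.dropWhile_cons, List.filter_cons]
    by_cases ha : f a ≤ x
    · rw [if_pos (by simpa using ha), if_neg (by simpa using not_lt.2 ha)]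
      exact ih h.2
    · rw [if_neg (by simpa using ha), if_pos (by simpa using not_le.1 ha)]
      congr 1
      symm
      rw [List.filter_eq_self]
      intro b hb
      simpa using lt_trans (not_le.1 ha) (h.1 b hb)

lemma GSeq_le (stones : List Int) (c : Nat) : ∀ j ∈ GSeq stones c, j < c := by
  induction c with
  | zero => simp [GSeq]
  | succ c ih =>
    intro j hj
    simp only [GSeq, List.mem_append, List.mem_filter, List.mem_singleton] at hj
    rcases hj with ⟨hj, -⟩ | rfl
    · exact Nat.lt_succ_of_lt (ih j hj)
    · exact Nat.lt_succ_self _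

lemma GSeq_pairwise_lt (stones : List Int) (c : Nat) : (GSeq stones c).Pairwise (· < ·) := by
  induction c with
  | zero => simp [GSeq]
  | succ c ih =>
    simp only [GSeq]
    refine List.pairwise_append.2 ⟨ih.filter _, by simp, ?_⟩
    intro a ha b hb
    rw [show b = c by simpa using hb]
    exact GSeq_le stones c a (List.mem_of_mem_filter ha)

lemma GSeq_mem (stones : List Int) (c : Nat) :
    ∀ j, (j ∈ GSeq stones (c + 1) ↔
      j ≤ c ∧ ∀ l, j < l → l ≤ c → vD stones l < vD stones j) := by
  induction c with
  | zero =>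
    intro j
    simp only [GSeq, List.filter_nil, List.nil_append, List.mem_singleton]
    constructor
    · rintro rfl; exact ⟨le_rfl, by omega⟩
    · rintro ⟨h, -⟩; omega
  | succ c ih =>
    intro j
    show j ∈ (GSeq stones (c + 1)).filter (fun j => decide (vD stones (c + 1) < vD stones j)) ++ [c + 1] ↔ _
    simp only [List.mem_append, List.mem_filter, List.mem_singleton, decide_eq_true_eq]
    constructor
    · rintro (⟨hj, hlt⟩ | rfl)
      · obtain ⟨hle, hgood⟩ := (ih j).1 hj
        refine ⟨by omega, fun l h1 h2 => ?_⟩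
        rcases Nat.lt_succ_iff_lt_or_eq.1 (Nat.lt_succ_of_le h2) with h | rfl
        · exact hgood l h1 (by omega)
        · exact hlt
      · exact ⟨le_rfl, fun l h1 h2 => by omega⟩
    · rintro ⟨hle, hgood⟩
      rcases Nat.lt_succ_iff_lt_or_eq.1 (Nat.lt_succ_of_le hle) with h | rfl
      · exact Or.inl ⟨(ih j).2 ⟨by omega, fun l h1 h2 => hgood l h1 (by omega)⟩,
          hgood (c + 1) (by omega) le_rfl⟩
      · exact Or.inr rfl

lemma GSeq_vdesc (stones : List Int) (c : Nat) :
    (GSeq stones c).Pairwise (fun a b => vD stones b < vD stones a) := by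
  cases c with
  | zero => simp [GSeq]
  | succ c =>
    have hpw := GSeq_pairwise_lt stones (c + 1)
    refine hpw.imp_of_mem ?_
    intro a b ha hb hab
    have hga := (GSeq_mem stones c a).1 ha
    have hgb := (GSeq_mem stones c b).1 hb
    exact hga.2 b hab hgb.1

lemma WSeq_vdesc (stones : List Int) (kn c : Nat) :
    (WSeq stones kn c).Pairwise (fun a b => vD stones b < vD stones a) := by
  cases c with
  | zero => simp [WSeq]
  | succ c => exact (GSeq_vdesc stones (c + 1)).filter _

lemma WSeq_mem (stones : List Int) (kn c : Nat) :
    ∀ j, (j ∈ WSeq stones kn (c + 1) ↔ j ∈ GSeq stones (c + 1) ∧ c < j + kn) := by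
  intro j
  show j ∈ (GSeq stones (c + 1)).filter (fun j => decide (c < j + kn)) ↔ _
  simp [List.mem_filter]

-- the back-pop + append of step i = c rebuilds GSeq (c+1), filtered to 'c ≤ j + kn'
lemma u_eq (stones : List Int) (kn c : Nat) :
    (WSeq stones kn c).filter (fun j => decide (vD stones c < vD stones j)) ++ [c]
      = (GSeq stones (c + 1)).filter (fun j => decide (c ≤ j + kn)) := by
  cases c with
  | zero => simp [WSeq, GSeq]
  | succ c =>
    show ((GSeq stones (c + 1)).filter (fun j => decide (c < j + kn))).filter
        (fun j => decide (vD stones (c + 1) < vD stones j)) ++ [c + 1]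
      = ((GSeq stones (c + 1)).filter (fun j => decide (vD stones (c + 1) < vD stones j)) ++ [c + 1]).filter
        (fun j => decide (c + 1 ≤ j + kn))
    rw [List.filter_append, List.filter_filter, List.filter_filter]
    congr 1
    · apply List.filter_congr
      intro j _
      rcases Nat.lt_or_ge c (j + kn) with h | h
      · simp [h, Nat.succ_le_of_lt h]
      · simp [Nat.not_lt.2 h, show ¬ (c + 1 ≤ j + kn) by omega]
    · symm
      rw [List.filter_eq_self]
      intro b hb
      simp only [List.mem_singleton] at hb
      subst hb
      simp

-- the conditional front-pop turns the 'c ≤ j + kn' filter into the 'c < j + kn' one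
lemma frontdrop (stones : List Int) (kn c : Nat) (k : Int) (hkcast : (kn : Int) = k)
    (j0 : Nat) (rest : List Nat)
    (hu : (GSeq stones (c + 1)).filter (fun j => decide (c ≤ j + kn)) = j0 :: rest) :
    (if ((j0 : Nat) : Int) ≤ (c : Int) - k then rest else j0 :: rest)
      = WSeq stones kn (c + 1) := by
  have hpw : ((GSeq stones (c + 1)).filter (fun j => decide (c ≤ j + kn))).Pairwise (· < ·) :=
    (GSeq_pairwise_lt stones (c + 1)).filter _
  rw [hu, List.pairwise_cons] at hpw
  have hj0 : c ≤ j0 + kn := by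
    have : j0 ∈ (GSeq stones (c + 1)).filter (fun j => decide (c ≤ j + kn)) := by
      rw [hu]; exact List.mem_cons_self
    simpa using (List.mem_filter.1 this).2
  have hrest : ∀ j ∈ rest, c ≤ j + kn := by
    intro j hj
    have : j ∈ (GSeq stones (c + 1)).filter (fun j => decide (c ≤ j + kn)) := by
      rw [hu]; exact List.mem_cons_of_mem _ hj
    simpa using (List.mem_filter.1 this).2
  have hW : WSeq stones kn (c + 1) = (j0 :: rest).filter (fun j => decide (c < j + kn)) := by
    show (GSeq stones (c + 1)).filter (fun j => decide (c < j + kn)) = _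
    rw [← hu, List.filter_filter]
    apply List.filter_congr
    intro j _
    rcases Nat.lt_or_ge c (j + kn) with h | h
    · simp [h, Nat.le_of_lt h]
    · simp [Nat.not_lt.2 h]
  rw [hW, List.filter_cons]
  split_ifs with h1 h2 h2
  · -- pop taken and j0 still in window: impossible
    exfalso
    have h2' : c < j0 + kn := by simpa using h2
    have h1' : (j0 : Int) + (kn : Int) ≤ (c : Int) := by omega
    have : ((j0 + kn : Nat) : Int) ≤ (c : Nat) := by push_cast; omega
    have := Int.ofNat_le.1 this
    omega
  · -- j0 is dropped; every j ∈ rest stays: j0 < j and j0 + kn = c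
    have h2' : ¬ c < j0 + kn := by simpa using h2
    symm
    rw [List.filter_eq_self]
    intro j hj
    have hlt : j0 < j := hpw.1 j hj
    have := hrest j hj
    simp only [decide_eq_true_eq]
    omega
  · -- no pop: the filter keeps everything
    congr 1
    symm
    rw [List.filter_eq_self]
    intro j hj
    have hlt : j0 < j := hpw.1 j hj
    have h1' : (c : Int) - k < (j0 : Int) := not_le.1 h1
    have hj0c : c < j0 + kn := by
      have : (c : Int) < (j0 : Int) + (kn : Int) := by omega
      have : ((c : Nat) : Int) < ((j0 + kn : Nat) : Int) := by push_cast; omega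
      exact_mod_cast this
    simp only [decide_eq_true_eq]
    omega
  · -- no pop but head outside window: impossible
    exfalso
    have h2' : ¬ c < j0 + kn := by simpa using h2
    have h1' : (c : Int) - k < (j0 : Int) := not_le.1 h1
    have : (c : Int) < (j0 : Int) + (kn : Int) := by omega
    have : ((c : Nat) : Int) < ((j0 + kn : Nat) : Int) := by push_cast; omega
    have := Int.ofNat_lt.1 this
    omega

lemma argmax_last (l : List Int) (hne : l ≠ []) :
    ∃ p, ∃ hp : p < l.length, (∀ q (hq : q < l.length), l[q] ≤ l[p]) ∧
      (∀ q (hq : q < l.length), p < q → l[q] < l[p]) := by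
  induction l with
  | nil => exact absurd rfl hne
  | cons x t ih =>
    cases t with
    | nil => exact ⟨0, by simp, by simp, by intro q hq h; simp at hq; omega⟩
    | cons y r =>
      obtain ⟨p, hp, hmax, hstrict⟩ := ih (by simp)
      by_cases hx : (y :: r)[p] < x
      · refine ⟨0, by simp, ?_, ?_⟩
        · rintro (_ | q) hq
          · simp
          · simp only [List.getElem_cons_succ, List.getElem_cons_zero]
            exact le_of_lt (lt_of_le_of_lt (hmax q (by simpa using hq)) hx)
        · rintro (_ | q) hq h
          · omega
          · simp only [List.getElem_cons_succ, List.getElem_cons_zero]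
            exact lt_of_le_of_lt (hmax q (by simpa using hq)) hx
      · refine ⟨p + 1, by simpa using hp, ?_, ?_⟩
        · rintro (_ | q) hq
          · simpa using not_lt.1 hx
          · simpa using hmax q (by simpa using hq)
        · rintro (_ | q) hq h
          · omega
          · simpa using hstrict q (by simpa using hq) (by omega)

-- the deque head is the maximum of the currently complete window [c+1-kn, c]
lemma head_winMax (stones : List Int) (k : Int) (hk : 1 ≤ k) (c : Nat)
    (hc : c < stones.length) (hw : k.toNat ≤ c + 1) :
    ∃ j0 rest, WSeq stones k.toNat (c + 1) = j0 :: rest ∧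
      vD stones j0 = winMax stones ((c : Int) - k + 1) k := by
  set kn := k.toNat with hknd
  have hkcast : (kn : Int) = k := Int.toNat_of_nonneg (by omega)
  have hkn1 : 1 ≤ kn := by omega
  set lo := c + 1 - kn with hlo
  have hlokn : lo + kn = c + 1 := by omega
  set w := (stones.drop lo).take kn with hwdef
  have hwlen : w.length = kn := by
    rw [hwdef, List.length_take, List.length_drop]
    omega
  have hwget : ∀ q (hq : q < w.length), w[q] = vD stones (lo + q) := by
    intro q hq
    simp only [hwdef, List.getElem_take, List.getElem_drop]
    rw [vD, List.getD_eq_getElem stones 0 (by omega)]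
  obtain ⟨p, hp, hmax, hstrict⟩ := argmax_last w (by intro h; rw [h] at hwlen; simp at hwlen; omega)
  have hpkn : p < kn := by omega
  -- jm = lo + p is in the deque
  have hjm : lo + p ∈ WSeq stones kn (c + 1) := by
    rw [WSeq_mem]
    refine ⟨(GSeq_mem stones c (lo + p)).2 ⟨by omega, ?_⟩, by omega⟩
    intro l h1 h2
    have hq : l - lo < kn := by omega
    have hlq : lo + (l - lo) = l := by omega
    have := hstrict (l - lo) (by omega) (by omega)
    rw [hwget (l - lo) (by omega), hlq] at this
    rw [hwget p (by omega)] at this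
    exact this
  obtain ⟨j0, rest, hW⟩ : ∃ j0 rest, WSeq stones kn (c + 1) = j0 :: rest := by
    cases hcase : WSeq stones kn (c + 1) with
    | nil => rw [hcase] at hjm; simp at hjm
    | cons a b => exact ⟨a, b, rfl⟩
  have hj0mem : j0 ∈ WSeq stones kn (c + 1) := by rw [hW]; exact List.mem_cons_self
  obtain ⟨hj0g, hj0w⟩ := (WSeq_mem stones kn c j0).1 hj0mem
  have hj0c : j0 ≤ c := ((GSeq_mem stones c j0).1 hj0g).1
  have hj0lo : lo ≤ j0 := by omega
  have hq0 : j0 - lo < kn := by omega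
  have hvj0 : vD stones j0 = w[j0 - lo]'(by omega) := by
    rw [hwget (j0 - lo) (by omega), show lo + (j0 - lo) = j0 by omega]
  -- head dominates jm (equal or strictly larger value)
  have hple : w[p] ≤ vD stones j0 := by
    rw [hW] at hjm
    rcases List.mem_cons.1 hjm with h | h
    · rw [hwget p (by omega), h]
    · have hdesc := WSeq_vdesc stones kn (c + 1)
      rw [hW] at hdesc
      have := List.rel_of_pairwise_cons hdesc h
      rw [hwget p (by omega)]
      exact le_of_lt this
  -- winMax of the window
  obtain ⟨hmem, hub⟩ := winMax_spec stones k (lo : Int) hk (by positivity)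
    (by rw [Int.toNat_natCast]; omega)
  rw [Int.toNat_natCast, ← hwdef] at hmem hub
  have h1 : winMax stones (lo : Int) k ≤ w[p] := by
    obtain ⟨q, hq, hq2⟩ := List.mem_iff_getElem.1 hmem
    rw [← hq2]; exact hmax q hq
  have h2 : vD stones j0 ≤ winMax stones (lo : Int) k := by
    apply hub
    rw [hvj0]
    exact List.getElem_mem _
  have hcast : ((lo : Nat) : Int) = (c : Int) - k + 1 := by omega
  refine ⟨j0, rest, hW, ?_⟩
  rw [← hcast]
  exact le_antisymm h2 (le_trans h1 hple)

lemma bestS_succ (stones : List Int) (k m : Int) (c : Nat) :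
    bestS stones k m (c + 1) =
      if (c : Int) ≥ k - 1 then min (bestS stones k m c) (winMax stones ((c : Int) - k + 1) k)
      else bestS stones k m c := by
  rw [bestS, bestS]
  split_ifs with h
  · rw [show ((c + 1 : Nat) : Int) - k + 1 = ((c : Int) - k + 1) + 1 by push_cast; ring,
        PySem.List.pyRange_one_succ_right (by omega), List.foldl_append]
    simp
  · rw [PySem.List.pyRange_one_eq_nil (by push_cast; omega),
        PySem.List.pyRange_one_eq_nil (by omega)]

lemma bStep_spec (stones : List Int) (k : Int) (hk : 1 ≤ k) (c : Nat)
    (hc : c < stones.length) (b : Int) :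
    bStep stones k (((WSeq stones k.toNat c).map (fun j => ((j : Nat) : Int))).reverse, b) (c : Int)
      = (((WSeq stones k.toNat (c + 1)).map (fun j => ((j : Nat) : Int))).reverse,
         if (c : Int) ≥ k - 1 then min b (winMax stones ((c : Int) - k + 1) k) else b) := by
  set kn := k.toNat with hknd
  have hkcast : (kn : Int) = k := Int.toNat_of_nonneg (by omega)
  have hvc : PySem.List.pyGetD stones (c : Int) 0 = vD stones c := by
    rw [PySem.List.pyGetD_natCast]; rfl
  -- the back-pop
  have hpop : popLe stones (PySem.List.pyGetD stones (c : Int) 0)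
      (((WSeq stones kn c).map (fun j => ((j : Nat) : Int))).reverse)
      = (((WSeq stones kn c).filter (fun j => decide (vD stones c < vD stones j))).map
          (fun j => ((j : Nat) : Int))).reverse := by
    rw [popLe_eq_dropWhile,
        dropWhile_eq_filter_of_incr (fun jI => PySem.List.pyGetD stones jI 0)]
    · rw [List.filter_reverse]
      congr 1
      rw [List.filter_map]
      congr 1
      apply List.filter_congr
      intro j _
      simp [Function.comp, PySem.List.pyGetD_natCast, vD]
    · rw [List.pairwise_reverse, List.pairwise_map]
      refine (WSeq_vdesc stones kn c).imp_of_mem ?_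
      intro a b _ _ hab
      simpa [PySem.List.pyGetD_natCast] using hab
  -- the deque after cons c, as reversed ascending list u
  have hu0 := u_eq stones kn c
  obtain ⟨j0, rest, hu⟩ : ∃ j0 rest,
      (GSeq stones (c + 1)).filter (fun j => decide (c ≤ j + kn)) = j0 :: rest := by
    have hcmem : c ∈ (GSeq stones (c + 1)).filter (fun j => decide (c ≤ j + kn)) := by
      rw [List.mem_filter]
      exact ⟨(GSeq_mem stones c c).2 ⟨le_rfl, fun l h1 h2 => by omega⟩, by simp⟩
    cases hcase : (GSeq stones (c + 1)).filter (fun j => decide (c ≤ j + kn)) with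
    | nil => rw [hcase] at hcmem; simp at hcmem
    | cons a t => exact ⟨a, t, rfl⟩
  have hrdq : (c : Int) :: (((WSeq stones kn c).filter
        (fun j => decide (vD stones c < vD stones j))).map (fun j => ((j : Nat) : Int))).reverse
      = ((j0 :: rest).map (fun j => ((j : Nat) : Int))).reverse := by
    rw [← hu, ← hu0, List.map_append, List.reverse_append]
    simp
  -- its Python dq[0] = getLast? of the reversed list
  have hlast : ((((j0 :: rest).map (fun j => ((j : Nat) : Int))).reverse).getLast?).getD 0
      = ((j0 : Nat) : Int) := by
    rw [List.getLast?_reverse]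
    simp
  have hfront := frontdrop stones kn c k hkcast j0 rest hu
  simp only [bStep, hpop, hrdq, hlast]
  split_ifs with h1 h2 h2
  · -- front popped, window complete
    rw [if_pos h1] at hfront
    obtain ⟨w0, wrest, hW, hval⟩ := head_winMax stones k hk c hc (by omega)
    rw [← hknd] at hW
    have hdrop : (((j0 :: rest).map (fun j => ((j : Nat) : Int))).reverse).dropLast
        = ((rest).map (fun j => ((j : Nat) : Int))).reverse := by
      simp [List.reverse_cons]
    rw [hdrop]
    rw [hfront, hW]
    have hlast2 : ((((w0 :: wrest).map (fun j => ((j : Nat) : Int))).reverse.getLast?).getD 0)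
        = ((w0 : Nat) : Int) := by
      rw [List.getLast?_reverse]; simp
    rw [hlast2, PySem.List.pyGetD_natCast,
        show stones.getD w0 0 = vD stones w0 from rfl, hval]
  · -- front popped, window not yet complete (impossible: pop needs j0 + kn ≤ c < kn - 1 + ... )
    exfalso
    -- j0 ∈ u: c ≤ j0 + kn; pop condition: j0 + kn ≤ c; so c = j0 + kn, but then c ≥ kn > c - k + ...
    have hj0mem : j0 ∈ (GSeq stones (c + 1)).filter (fun j => decide (c ≤ j + kn)) := by
      rw [hu]; exact List.mem_cons_self
    have hj0c : c ≤ j0 + kn := by simpa using (List.mem_filter.1 hj0mem).2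
    omega
  · -- no pop, window complete
    rw [if_neg h1] at hfront
    obtain ⟨w0, wrest, hW, hval⟩ := head_winMax stones k hk c hc (by omega)
    rw [← hknd] at hW
    rw [hfront, hW]
    have hlast2 : ((((w0 :: wrest).map (fun j => ((j : Nat) : Int))).reverse.getLast?).getD 0)
        = ((w0 : Nat) : Int) := by
      rw [List.getLast?_reverse]; simp
    rw [hlast2, PySem.List.pyGetD_natCast,
        show stones.getD w0 0 = vD stones w0 from rfl, hval]
  · -- no pop, window not complete
    rw [if_neg h1] at hfront
    rw [hfront]

lemma deque_invariant (stones : List Int) (k m : Int) (hk : 1 ≤ k)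
    (_hkn : k ≤ (stones.length : Int)) :
    ∀ c : Nat, c ≤ stones.length →
      (PySem.List.pyRange 0 (c : Int) 1).foldl (bStep stones k) ([], m) =
        (((WSeq stones k.toNat c).map (fun j => ((j : Nat) : Int))).reverse, bestS stones k m c) := by
  intro c
  induction c with
  | zero =>
    intro _
    rw [PySem.List.pyRange_one_eq_nil (by omega)]
    simp only [List.foldl_nil, WSeq, List.map_nil, List.reverse_nil]
    rw [bestS, PySem.List.pyRange_one_eq_nil (by omega)]
    rfl
  | succ c ih =>
    intro hcn
    rw [show ((c + 1 : Nat) : Int) = (c : Int) + 1 by push_cast; ring,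
        PySem.List.pyRange_one_succ_right (by omega), List.foldl_append, List.foldl_cons,
        List.foldl_nil, ih (by omega), bStep_spec stones k hk c (by omega) _, bestS_succ]

-- ===== VERDICT (by name: the statement is the Claim_ definition above) =====
theorem solution_spec : Claim_equal_solution := by
  intro stones k _ hpre
  obtain ⟨hne, hk⟩ := hpre
  unfold Spec_solution solution solution_alt
  obtain ⟨m, hm⟩ : ∃ m, PySem.List.max? stones (fun x => x) = some m := by
    cases hc : PySem.List.max? stones (fun x => x)
    · rw [PySem.List.max?_eq_none_iff] at hc; exact absurd hc hne
    · exact ⟨_, rfl⟩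
  have hmmax : ∀ y ∈ stones, y ≤ m := PySem.List.max?_isMax hm
  rw [hm]
  simp only [Option.getD_some]
  by_cases hbig : k > (stones.length : Int)
  · -- k > n: every candidate passes; A's search returns max(stones) capped at ≥ 1, B returns max m 0
    rw [if_pos hbig]
    have hall : ∀ mid, checkLoop k mid stones 0 = true := by
      intro mid
      rw [checkLoop_true_iff hk]
      rintro ⟨i, hlen, -⟩
      omega
    rw [bsGo_all_true stones k hall]
    split_ifs <;> omega
  · rw [if_neg hbig]
    rw [not_lt] at hbig
    set F := (PySem.List.pyRange 0 ((stones.length : Int) - k + 1) 1).foldl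
      (fun best i => min best (winMax stones i k)) m with hF
    have hfold : ((PySem.List.pyRange 0 ((stones.length : Int)) 1).foldl (bStep stones k) ([], m)).2
        = F := by
      rw [deque_invariant stones k m hk hbig stones.length le_rfl]
      rfl
    rw [hfold]
    have hFm : F ≤ m := foldl_min_le _ _ _
    have hFlt : ∀ mid, F < mid ↔ HasRun stones mid k.toNat := by
      intro mid
      rw [hF, foldl_min_lt_iff, hasRun_iff_exists_win stones k hk hbig mid]
      constructor
      · rintro (h | h)
        · -- m < mid: the first window's max is ≤ m < mid
          refine ⟨0, ?_, ?_⟩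
          · rw [PySem.List.mem_pyRange_one]; omega
          · obtain ⟨hmem, -⟩ := winMax_spec stones k 0 hk le_rfl (by omega)
            have : winMax stones 0 k ≤ m := hmmax _ (mem_window_mem stones _ _ hmem)
            omega
        · exact h
      · exact Or.inr
    have hP : ∀ mid, checkLoop k mid stones 0 = true ↔ mid ≤ F := by
      intro mid
      rw [checkLoop_true_iff hk, ← hFlt mid]
      omega
    rw [bsGo_eq_of_iff stones k F hP]
    split_ifs <;> omega
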